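-- pv_equiv track=rewrite | github.com/Msstarke/hypixel-skyblock-ai-bot | enchants.py | _infer_use_case
-- ===== SOURCE A (Python) =====
-- def _infer_use_case(item_id: str) -> str:
--     """Infer what an item is used for based on its ID."""
--     item = item_id.lower()
--     if any(x in item for x in ("divan", "glacite", "mineral", "mithril")):
--         return "mining"
--     # Specific wither set roles
--     if "wise_wither" in item or "storm" in item:
--         return "mage"
--     if "tank_wither" in item or "goldor" in item:
--         return "tank"
--     if "speed_wither" in item or "maxor" in item:
--         return "dungeons"  # Maxor is speed/berserk
--     if any(x in item for x in ("power_wither", "shadow_assassin", "necron",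
--                                 "aurora", "terror")):
--         return "dungeons"
--     if any(x in item for x in ("hyperion", "astraea", "scylla", "valkyrie")):
--         return "dungeons"
--     if any(x in item for x in ("terminator", "juju")):
--         return "archer"
--     if any(x in item for x in ("livid", "aote", "midas")):
--         return "combat"
--     return "combat"
-- ===== SOURCE B (Python) =====
-- # Flat pattern table in priority order: (pattern, use-case).
-- FLAT = [
--     ("divan", "mining"), ("glacite", "mining"), ("mineral", "mining"), ("mithril", "mining"),
--     ("wise_wither", "mage"), ("storm", "mage"),
--     ("tank_wither", "tank"), ("goldor", "tank"),
--     ("speed_wither", "dungeons"), ("maxor", "dungeons"),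
--     ("power_wither", "dungeons"), ("shadow_assassin", "dungeons"), ("necron", "dungeons"),
--     ("aurora", "dungeons"), ("terror", "dungeons"),
--     ("hyperion", "dungeons"), ("astraea", "dungeons"), ("scylla", "dungeons"), ("valkyrie", "dungeons"),
--     ("terminator", "archer"), ("juju", "archer"),
--     ("livid", "combat"), ("aote", "combat"), ("midas", "combat"),
-- ]
--
--
-- def _infer_use_case(item_id: str) -> str:
--     """Infer what an item is used for based on its ID."""
--     item = item_id.lower()
--     matches = [(rank, use) for rank, (pat, use) in enumerate(FLAT) if pat in item]
--     if not matches: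
--         return "combat"
--     return min(matches, key=lambda t: t[0])[1]
-- ===== Notes on version B (the rewrite author's own statement) =====
-- stated objective: alternative
-- what changed: Instead of an early-returning if/elif cascade over pattern groups, B builds the full list of ALL matching (rank, use) pairs from a flat priority-ranked pattern table in one comprehension pass and then selects the match of minimal rank with min(); no short-circuiting, the priority is resolved by selection afterwards.
import Mathlib
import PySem

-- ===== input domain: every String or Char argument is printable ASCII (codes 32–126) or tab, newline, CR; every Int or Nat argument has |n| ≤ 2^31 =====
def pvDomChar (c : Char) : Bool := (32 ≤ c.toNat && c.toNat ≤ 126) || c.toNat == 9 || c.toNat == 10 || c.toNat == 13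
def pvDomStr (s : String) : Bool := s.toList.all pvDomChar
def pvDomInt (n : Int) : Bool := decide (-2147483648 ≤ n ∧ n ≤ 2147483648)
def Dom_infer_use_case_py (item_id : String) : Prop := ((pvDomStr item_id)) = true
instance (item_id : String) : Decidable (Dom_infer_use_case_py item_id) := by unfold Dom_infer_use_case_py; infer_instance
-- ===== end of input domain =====

-- B replaces A's early-returning if/elif cascade by collecting ALL matches of a flat priority-ranked pattern table and selecting the minimal-rank one (objective: alternative); same results.


-- ===== PORT A =====
-- literal port of A's if/elif branch cascade
def infer_use_case_py (item_id : String) : String :=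
  let item := PySem.Str.lower item_id
  if (["divan", "glacite", "mineral", "mithril"].any (fun x => PySem.Str.isIn x item)) then "mining"
  else if (PySem.Str.isIn "wise_wither" item || PySem.Str.isIn "storm" item) then "mage"
  else if (PySem.Str.isIn "tank_wither" item || PySem.Str.isIn "goldor" item) then "tank"
  else if (PySem.Str.isIn "speed_wither" item || PySem.Str.isIn "maxor" item) then "dungeons"
  else if (["power_wither", "shadow_assassin", "necron", "aurora", "terror"].any (fun x => PySem.Str.isIn x item)) then "dungeons"
  else if (["hyperion", "astraea", "scylla", "valkyrie"].any (fun x => PySem.Str.isIn x item)) then "dungeons"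
  else if (["terminator", "juju"].any (fun x => PySem.Str.isIn x item)) then "archer"
  else if (["livid", "aote", "midas"].any (fun x => PySem.Str.isIn x item)) then "combat"
  else "combat"

-- ===== PORT B =====
-- flat pattern table in priority order (Source B's FLAT)
def pvFlat : List (String × String) :=
  [ ("divan", "mining"), ("glacite", "mining"), ("mineral", "mining"), ("mithril", "mining"),
    ("wise_wither", "mage"), ("storm", "mage"),
    ("tank_wither", "tank"), ("goldor", "tank"),
    ("speed_wither", "dungeons"), ("maxor", "dungeons"),
    ("power_wither", "dungeons"), ("shadow_assassin", "dungeons"), ("necron", "dungeons"),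
    ("aurora", "dungeons"), ("terror", "dungeons"),
    ("hyperion", "dungeons"), ("astraea", "dungeons"), ("scylla", "dungeons"), ("valkyrie", "dungeons"),
    ("terminator", "archer"), ("juju", "archer"),
    ("livid", "combat"), ("aote", "combat"), ("midas", "combat") ]

-- Source B: collect ALL matching (rank, use) pairs, then min(matches, key=fst) (ranks are distinct,
-- so the fst key is exact for Python's tuple min here); "combat" if no match
def infer_use_case_py_alt (item_id : String) : String :=
  let item := PySem.Str.lower item_id
  let matchList := ((PySem.List.enumerate pvFlat).filter
      (fun r => PySem.Str.isIn r.2.1 item)).map (fun r => (r.1, r.2.2))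
  match PySem.List.min? matchList (fun t => t.1) with
  | none => "combat"
  | some m => m.2

-- ===== PRECONDITION & SPEC =====
def Spec_infer_use_case_py (item_id : String) (out : String) : Prop := out = infer_use_case_py_alt item_id
instance (item_id : String) (out : String) : Decidable (Spec_infer_use_case_py item_id out) := by unfold Spec_infer_use_case_py; infer_instance

-- ===== CLAIM (what is proved, stated in full; the proofs are below) =====
def Claim_equal_infer_use_case_py : Prop := ∀ (item_id : String), Dom_infer_use_case_py item_id → Spec_infer_use_case_py item_id (infer_use_case_py item_id)

-- ===== LEMMAS AND PROOFS =====

-- proof helper: the first-match cascade over a flat pattern list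
def pvFirstFlat (item : String) : List (String × String) → String
  | [] => "combat"
  | (p, u) :: t => if PySem.Str.isIn p item then u else pvFirstFlat item t

-- min? with strictly smaller head key returns the head
theorem pv_min?_cons_of_lt (x : Int × String) (t : List (Int × String))
    (h : ∀ y ∈ t, x.1 < y.1) :
    PySem.List.min? (x :: t) (fun p => p.1) = some x := by
  cases heq : PySem.List.min? (x :: t) (fun p => p.1) with
  | none => exact absurd ((PySem.List.min?_eq_none_iff _ _).mp heq) (by simp)
  | some m =>
    have hmem := PySem.List.min?_mem heq
    have hmin := PySem.List.min?_isMin heq x (by simp)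
    rcases List.mem_cons.mp hmem with rfl | hm
    · rfl
    · exact absurd hmin (by simpa using (h m hm))

-- min-rank selection over all matches of the enumerated table = first-match cascade
theorem pv_minSel_eq_firstFlat (item : String) :
    ∀ (xs : List (String × String)) (s : Int),
    (match PySem.List.min? (((PySem.List.enumerate xs s).filter
        (fun r => PySem.Str.isIn r.2.1 item)).map (fun r => (r.1, r.2.2))) (fun t => t.1) with
     | none => "combat"
     | some m => m.2) = pvFirstFlat item xs := by
  intro xs
  induction xs with
  | nil =>
    intro s
    simp [PySem.List.enumerate_nil, pvFirstFlat, PySem.List.min?]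
  | cons hd t ih =>
    intro s
    obtain ⟨p, u⟩ := hd
    rw [PySem.List.enumerate_cons]
    by_cases hp : PySem.Str.isIn p item = true
    · have hlt : ∀ y ∈ ((PySem.List.enumerate t (s + 1)).filter
          (fun r => PySem.Str.isIn r.2.1 item)).map (fun r => (r.1, r.2.2)),
          ((s, u) : Int × String).1 < y.1 := by
        intro y hy
        rcases List.mem_map.mp hy with ⟨r, hr, rfl⟩
        have hr' := List.mem_of_mem_filter hr
        rcases (PySem.List.mem_enumerate_iff _ _ _).mp hr' with ⟨k, hk, rfl⟩
        simp
        omega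
      simp only [List.filter_cons, hp, if_pos, List.map_cons]
      rw [pv_min?_cons_of_lt _ _ hlt]
      simp only [pvFirstFlat, hp, if_true]
    · have hp' : PySem.Str.isIn p item = false := eq_false_of_ne_true hp
      simp only [List.filter_cons, hp', Bool.false_eq_true, if_false]
      rw [ih (s + 1)]
      simp only [pvFirstFlat, hp', Bool.false_eq_true, if_false]

-- the cascade absorbs one constant-use group as an 'any' test
theorem pv_firstFlat_group (item u : String) (ps : List String) (rest : List (String × String)) :
    pvFirstFlat item (ps.map (fun p => (p, u)) ++ rest)
      = if ps.any (fun p => PySem.Str.isIn p item) then u else pvFirstFlat item rest := by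
  induction ps with
  | nil => simp
  | cons q qs ih =>
    by_cases hq : PySem.Str.isIn q item = true
    · simp only [List.map_cons, List.cons_append, pvFirstFlat, hq, if_true, List.any_cons,
        Bool.true_or]
    · have hq' : PySem.Str.isIn q item = false := eq_false_of_ne_true hq
      simp only [List.map_cons, List.cons_append, pvFirstFlat, hq', Bool.false_eq_true, if_false,
        List.any_cons, Bool.false_or, ih]

-- the cascade over the concrete table equals A's grouped if/elif cascade
theorem pv_firstFlat_eq_A (item_id : String) :
    infer_use_case_py item_id = pvFirstFlat (PySem.Str.lower item_id) pvFlat := by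
  have hflat : pvFlat =
      (["divan", "glacite", "mineral", "mithril"].map (fun p => (p, "mining"))) ++
      ((["wise_wither", "storm"].map (fun p => (p, "mage"))) ++
      ((["tank_wither", "goldor"].map (fun p => (p, "tank"))) ++
      ((["speed_wither", "maxor"].map (fun p => (p, "dungeons"))) ++
      ((["power_wither", "shadow_assassin", "necron", "aurora", "terror"].map (fun p => (p, "dungeons"))) ++
      ((["hyperion", "astraea", "scylla", "valkyrie"].map (fun p => (p, "dungeons"))) ++
      ((["terminator", "juju"].map (fun p => (p, "archer"))) ++
      ((["livid", "aote", "midas"].map (fun p => (p, "combat"))) ++ ([] : List (String × String))))))))) := by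
    rfl
  rw [hflat]
  rw [pv_firstFlat_group, pv_firstFlat_group, pv_firstFlat_group, pv_firstFlat_group,
      pv_firstFlat_group, pv_firstFlat_group, pv_firstFlat_group, pv_firstFlat_group]
  unfold infer_use_case_py
  simp only [List.any_cons, List.any_nil, Bool.or_false, pvFirstFlat]

-- ===== VERDICT (by name: the statement is the Claim_ definition above) =====
theorem infer_use_case_py_spec : Claim_equal_infer_use_case_py := by
  intro item_id _
  unfold Spec_infer_use_case_py infer_use_case_py_alt
  rw [pv_firstFlat_eq_A, pv_minSel_eq_firstFlat (PySem.Str.lower item_id) pvFlat 0]
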